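-- pv_equiv track=rewrite | github.com/ygorg/thesis_workspace | publications/20220403_phd/6_impact_ri/figures/code_prmu.py | kw_category
-- ===== SOURCE A (Python) =====
-- def contains(small, big):
--     # Checks whether `small` appear contiguously in `big`
--     for i in range(
--             len(big) - len(small) + 1):
--         match_len = 0
--         for j in range(len(small)):
--             if big[i + j] == small[j]:
--                 match_len += 1
--             else:
--                 break
--
--         if match_len == len(small):
--             # Every elements were found
--             return True
--     return False
--
-- def kw_category(kw, doc):
--     if contains(kw, doc):
--         return 'P'  # Present
--     else:
--         abs_words = [w for w in kw if w not in doc]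
--         if len(abs_words) == 0:
--             return 'R'  # Reordered
--         elif len(abs_words) < len(kw):
--             return 'M'  # Mixed
--         elif len(abs_words) == len(kw):
--             return 'U'  # Unseen
-- ===== SOURCE B (Python) =====
-- def kw_category(kw, doc):
--     # One left-to-right pass over doc simulating the set of active partial
--     # matches of kw (lengths of kw-prefixes that end at the current token),
--     # instead of re-scanning from every start position; membership is then
--     # decided with one hash set of doc tokens.
--     k = len(kw)
--     states = [0]
--     found = (k == 0)
--     for w in doc:
--         states = [j + 1 for j in states if j < k and kw[j] == w] + [0]
--         if k in states:
--             found = True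
--     if found:
--         return 'P'
--     seen = set(doc)
--     hits = [w in seen for w in kw]
--     if all(hits):
--         return 'R'
--     if any(hits):
--         return 'M'
--     return 'U'
-- ===== Notes on version B (the rewrite author's own statement) =====
-- stated objective: faster
-- what changed: B replaces A's restart-at-every-start-position containment scan by a single left-to-right pass over doc that maintains the set of active partial-match lengths (an NFA-state simulation), and replaces A's per-keyword 'w not in doc' list scans by one hash set of doc tokens.
import Mathlib
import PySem

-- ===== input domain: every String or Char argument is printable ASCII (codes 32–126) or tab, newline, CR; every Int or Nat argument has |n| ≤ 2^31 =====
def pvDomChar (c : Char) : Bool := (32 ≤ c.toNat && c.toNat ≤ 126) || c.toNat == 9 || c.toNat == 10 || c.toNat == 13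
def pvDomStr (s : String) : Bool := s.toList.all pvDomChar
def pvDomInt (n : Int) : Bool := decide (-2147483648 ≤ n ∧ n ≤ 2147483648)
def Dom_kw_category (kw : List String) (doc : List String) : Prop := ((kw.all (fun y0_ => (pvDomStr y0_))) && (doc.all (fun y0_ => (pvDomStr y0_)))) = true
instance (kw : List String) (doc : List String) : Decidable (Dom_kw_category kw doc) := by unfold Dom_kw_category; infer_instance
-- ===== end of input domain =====

-- B replaces A's restart-at-every-position containment scan by a single left-to-right pass
-- simulating the set of active partial matches, and A's per-keyword list scans by one hash set.

-- ===== PORT A =====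
-- inner loop 'for j in range(len(small)): if big[i+j]==small[j]: match_len += 1 else: break'
-- (returns the final match_len; the 'none' branch of pyGet? is the IndexError case, unreachable
-- for the indices A's outer range produces)
def pvMatchLen (small big : List String) (i : Int) (j : Nat) : Nat :=
  if h : j < small.length then
    match PySem.List.pyGet? big (i + j) with
    | some w => if w == small[j] then pvMatchLen small big i (j + 1) else j
    | none => j
  else j
termination_by small.length - j

-- outer loop 'for i in range(len(big) - len(small) + 1): … return True … / return False'
def pvContainsGo (small big : List String) (rng : List Int) : Bool :=
  match rng with
  | [] => false
  | i :: rest =>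
      if pvMatchLen small big i 0 == small.length then true
      else pvContainsGo small big rest

def pvContains (small big : List String) : Bool :=
  pvContainsGo small big (PySem.List.pyRange 0 ((big.length : Int) - small.length + 1) 1)

def kw_category (kw : List String) (doc : List String) : String :=
  if pvContains kw doc then "P"
  else
    let abs_words := kw.filter (fun w => !(doc.contains w))
    if abs_words.length == 0 then "R"
    else if abs_words.length < kw.length then "M"
    else if abs_words.length == kw.length then "U"
    else ""  -- unreachable (abs_words is a sublist of kw); Python falls off the end here

-- ===== PORT B =====
-- loop body: states = [j + 1 for j in states if j < k and kw[j] == w] + [0]; if k in states: found = True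
def pvStep (kw : List String) (k : Nat) (acc : List Nat × Bool) (w : String) : List Nat × Bool :=
  let states := ((acc.1.filter (fun j => decide (j < k) && (kw.getD j "" == w))).map (fun j => j + 1)) ++ [0]
  (states, acc.2 || states.contains k)

def kw_category_alt (kw : List String) (doc : List String) : String :=
  let k := kw.length
  let res := doc.foldl (pvStep kw k) ([0], k == 0)
  if res.2 then "P"
  else
    let seen := PySem.Set.ofList doc
    let hits := kw.map (fun w => PySem.Set.contains seen w)
    if hits.all id then "R"
    else if hits.any id then "M"
    else "U"

-- ===== PRECONDITION & SPEC =====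
def Spec_kw_category (kw : List String) (doc : List String) (out : String) : Prop := out = kw_category_alt kw doc
instance (kw : List String) (doc : List String) (out : String) : Decidable (Spec_kw_category kw doc out) := by unfold Spec_kw_category; infer_instance

-- ===== CLAIM (what is proved, stated in full; the proofs are below) =====
def Claim_equal_kw_category : Prop := ∀ (kw : List String) (doc : List String), Dom_kw_category kw doc → Spec_kw_category kw doc (kw_category kw doc)

-- ===== LEMMAS AND PROOFS =====

lemma containsGo_eq_any (small big : List String) (rng : List Int) :
    pvContainsGo small big rng
      = rng.any (fun i => pvMatchLen small big i 0 == small.length) := by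
  induction rng with
  | nil => rfl
  | cons i rest ih =>
      simp only [pvContainsGo, List.any_cons, ih]
      by_cases h : (pvMatchLen small big i 0 == small.length) = true <;> simp [h]

-- A's inner loop decides "small matches big at offset i" = slice equality
lemma matchLen_eq_slice (small big : List String) (i : Nat) :
    ∀ (n j : Nat), j ≤ small.length → small.length - j = n →
    (pvMatchLen small big (i : Int) j == small.length)
      = ((big.drop (i + j)).take (small.length - j) == small.drop j) := by
  intro n
  induction n with
  | zero =>
      intro j hj hn
      have hje : j = small.length := by omega
      subst hje
      rw [pvMatchLen]
      simp [List.drop_length]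
  | succ n ih =>
      intro j hj hn
      have h : j < small.length := by omega
      rw [pvMatchLen, dif_pos h]
      have hidx : (i : Int) + j = ((i + j : Nat) : Int) := by push_cast; ring
      rw [hidx, PySem.List.pyGet?_natCast]
      have hsd : small.drop j = small[j] :: small.drop (j+1) := List.drop_eq_getElem_cons h
      rcases hg : big[(i+j)]? with _ | w
      · have hred : (match (none : Option String) with
            | some w => if (w == small[j]) = true then pvMatchLen small big (↑i) (j + 1) else j
            | none => j) = j := rfl
        rw [hred]
        have hge : big.length ≤ i + j := List.getElem?_eq_none_iff.mp hg
        have hdrop : big.drop (i + j) = [] := List.drop_eq_nil_of_le hge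
        rw [hdrop, Bool.eq_iff_iff]
        simp only [List.take_nil, beq_iff_eq, List.nil_eq, List.drop_eq_nil_iff]
        omega
      · have hred : (match some w with
            | some w => if (w == small[j]) = true then pvMatchLen small big (↑i) (j + 1) else j
            | none => j) = if (w == small[j]) = true then pvMatchLen small big (↑i) (j + 1) else j := rfl
        rw [hred]
        obtain ⟨hlt, hw⟩ := List.getElem?_eq_some_iff.mp hg
        have hbd : big.drop (i + j) = big[i+j] :: big.drop (i+j+1) := List.drop_eq_getElem_cons hlt
        have htk : small.length - j = (small.length - (j+1)) + 1 := by omega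
        rw [hbd, hsd, htk, List.take_succ_cons, List.cons_beq_cons, hw]
        by_cases hww : (w == small[j]) = true
        · rw [if_pos hww, hww, Bool.true_and]
          have hih := ih (j+1) (by omega) (by omega)
          rw [hih]
          have : i + (j+1) = i + j + 1 := by omega
          rw [this]
        · rw [if_neg hww]
          simp only [Bool.not_eq_true] at hww
          simp [hww, Nat.ne_of_lt h]

-- infix characterised by drop/take at an offset
lemma infix_iff_drop_take (kw doc : List String) :
    kw <:+: doc ↔ ∃ i : Nat, i + kw.length ≤ doc.length ∧ (doc.drop i).take kw.length = kw := by
  constructor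
  · rintro ⟨s, t, rfl⟩
    refine ⟨s.length, by simp, ?_⟩
    rw [List.append_assoc, List.drop_left, List.take_left]
  · rintro ⟨i, hle, htk⟩
    refine ⟨doc.take i, doc.drop (i + kw.length), ?_⟩
    have h3 : (doc.drop i).drop kw.length = doc.drop (i + kw.length) := by
      rw [List.drop_drop]
    have h2 := List.take_append_drop kw.length (doc.drop i)
    rw [htk, h3] at h2
    rw [List.append_assoc, h2, List.take_append_drop]

-- A's containment scan decides the infix relation
lemma contains_iff_infix (kw doc : List String) :
    pvContains kw doc = true ↔ kw <:+: doc := by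
  rw [pvContains, containsGo_eq_any, PySem.List.pyRange_one, List.any_map, List.any_eq_true]
  rw [infix_iff_drop_take]
  constructor
  · rintro ⟨i, hi, hmat⟩
    rw [List.mem_range] at hi
    have h0 : (0 : Int) + (i : Int) = ((i : Nat) : Int) := by ring
    simp only [Function.comp_apply, h0] at hmat
    rw [matchLen_eq_slice kw doc i kw.length 0 (by omega) (by omega)] at hmat
    simp only [Nat.add_zero, Nat.sub_zero, List.drop_zero, beq_iff_eq] at hmat
    refine ⟨i, ?_, hmat⟩
    have hlen := congrArg List.length hmat
    simp only [List.length_take, List.length_drop] at hlen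
    omega
  · rintro ⟨i, hle, htk⟩
    refine ⟨i, ?_, ?_⟩
    · rw [List.mem_range]
      omega
    · have h0 : (0 : Int) + (i : Int) = ((i : Nat) : Int) := by ring
      simp only [Function.comp_apply, h0]
      rw [matchLen_eq_slice kw doc i kw.length 0 (by omega) (by omega)]
      simp only [Nat.add_zero, Nat.sub_zero, List.drop_zero, beq_iff_eq]
      exact htk

-- concat-vs-concat suffixes
lemma suffix_concat_iff {α : Type} (l d : List α) (x w : α) :
    (l ++ [x]) <:+ (d ++ [w]) ↔ x = w ∧ l <:+ d := by
  constructor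
  · rintro ⟨s, hs⟩
    rw [← List.append_assoc] at hs
    have := List.append_inj' hs rfl
    exact ⟨by simpa using this.2, ⟨s, this.1⟩⟩
  · rintro ⟨rfl, s, rfl⟩
    exact ⟨s, by simp⟩

-- infix of a concat
lemma infix_concat_iff {α : Type} (l d : List α) (w : α) :
    l <:+: (d ++ [w]) ↔ l <:+: d ∨ l <:+ (d ++ [w]) := by
  constructor
  · rintro ⟨s, t, hst⟩
    rcases List.eq_nil_or_concat t with rfl | ⟨t', x, rfl⟩
    · right; exact ⟨s, by simpa using hst⟩
    · left
      rw [List.concat_eq_append, ← List.append_assoc] at hst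
      have := List.append_inj' hst rfl
      exact ⟨s, t', this.1⟩
  · rintro (h | ⟨s, hs⟩)
    · obtain ⟨u, v, rfl⟩ := h
      exact ⟨u, v ++ [w], by simp⟩
    · exact ⟨s, [], by simp [hs]⟩

lemma states_step (kw : List String) (d : List String) (w : String) (states : List Nat)
    (hst : ∀ j, j ∈ states ↔ j ≤ kw.length ∧ kw.take j <:+ d) :
    ∀ m, m ∈ ((states.filter (fun j => decide (j < kw.length) && (kw.getD j "" == w))).map (fun j => j + 1)) ++ [0]
      ↔ m ≤ kw.length ∧ kw.take m <:+ (d ++ [w]) := by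
  intro m
  simp only [List.mem_append, List.mem_map, List.mem_filter, List.mem_singleton,
    Bool.and_eq_true, decide_eq_true_eq, beq_iff_eq]
  constructor
  · rintro (⟨j, ⟨hjs, hjk, hjw⟩, rfl⟩ | rfl)
    · obtain ⟨hjle, hsuf⟩ := (hst j).mp hjs
      refine ⟨by omega, ?_⟩
      have htk : kw.take (j+1) = kw.take j ++ [kw[j]'hjk] := by
        rw [List.take_add_one, List.getElem?_eq_getElem hjk]; rfl
      rw [htk, suffix_concat_iff]
      simp only [List.getD_eq_getElem?_getD, List.getElem?_eq_getElem hjk, Option.getD_some] at hjw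
      exact ⟨hjw, hsuf⟩
    · exact ⟨by omega, by simp⟩
  · rintro ⟨hmk, hsuf⟩
    rcases m with _ | j
    · right; rfl
    · left
      have hjk : j < kw.length := by omega
      have htk : kw.take (j+1) = kw.take j ++ [kw[j]'hjk] := by
        rw [List.take_add_one, List.getElem?_eq_getElem hjk]; rfl
      rw [htk, suffix_concat_iff] at hsuf
      refine ⟨j, ⟨(hst j).mpr ⟨by omega, hsuf.2⟩, hjk, ?_⟩, rfl⟩
      simp only [List.getD_eq_getElem?_getD, List.getElem?_eq_getElem hjk, Option.getD_some]
      exact hsuf.1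

lemma fold_inv (kw : List String) :
    ∀ (rest d : List String) (states : List Nat) (found : Bool),
    (∀ j, j ∈ states ↔ j ≤ kw.length ∧ kw.take j <:+ d) →
    (found = true ↔ kw <:+: d) →
    ((rest.foldl (pvStep kw kw.length) (states, found)).2 = true ↔ kw <:+: (d ++ rest)) := by
  intro rest
  induction rest with
  | nil => intro d states found _ hf; simpa using hf
  | cons w rest ih =>
      intro d states found hst hf
      rw [List.foldl_cons]
      have hst' := states_step kw d w states hst
      have hf' : ((pvStep kw kw.length (states, found) w).2 = true ↔ kw <:+: (d ++ [w])) := by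
        simp only [pvStep, Bool.or_eq_true, List.contains_iff_mem]
        rw [hf, hst' kw.length, infix_concat_iff]
        constructor
        · rintro (h | ⟨_, h⟩)
          · exact Or.inl h
          · right; simpa [List.take_length] using h
        · rintro (h | h)
          · exact Or.inl h
          · right; exact ⟨le_refl _, by simpa [List.take_length] using h⟩
      have := ih (d ++ [w]) (pvStep kw kw.length (states, found) w).1
        (pvStep kw kw.length (states, found) w).2 hst' hf'
      simpa using this

lemma alt_found_iff_infix (kw doc : List String) :
    (doc.foldl (pvStep kw kw.length) ([0], kw.length == 0)).2 = true ↔ kw <:+: doc := by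
  have h := fold_inv kw doc [] [0] (kw.length == 0) ?_ ?_
  · simpa using h
  · intro j
    simp only [List.mem_singleton]
    constructor
    · rintro rfl; exact ⟨by omega, by simp⟩
    · rintro ⟨hj, hsuf⟩
      have := hsuf.length_le
      simp only [List.length_take, List.length_nil] at this
      omega
  · simp only [beq_iff_eq]
    rw [List.infix_nil]
    exact ⟨fun h => List.length_eq_zero_iff.mp h, fun h => h ▸ rfl⟩

lemma set_contains_eq (doc : List String) (w : String) :
    PySem.Set.contains (PySem.Set.ofList doc) w = doc.contains w := by
  rw [Bool.eq_iff_iff]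
  simp [PySem.Set.contains, PySem.Set.mem_ofList]

-- ===== VERDICT (by name: the statement is the Claim_ definition above) =====
theorem kw_category_spec : Claim_equal_kw_category := by
  intro kw doc _
  simp only [Spec_kw_category, kw_category, kw_category_alt]
  have hPB : pvContains kw doc = (doc.foldl (pvStep kw kw.length) ([0], kw.length == 0)).2 := by
    rw [Bool.eq_iff_iff, contains_iff_infix, alt_found_iff_infix]
  rw [hPB]
  by_cases hf : (doc.foldl (pvStep kw kw.length) ([0], kw.length == 0)).2 = true
  · rw [if_pos hf, if_pos hf]
  · rw [Bool.not_eq_true] at hf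
    have hcont : ∀ w, PySem.Set.contains (PySem.Set.ofList doc) w = doc.contains w :=
      fun w => set_contains_eq doc w
    simp only [hf, Bool.false_eq_true, if_false]
    by_cases hball : ((kw.map (fun w => PySem.Set.contains (PySem.Set.ofList doc) w)).all id) = true
    · have hP : ∀ a ∈ kw, a ∈ doc := by
        intro a ha
        have := List.all_eq_true.mp hball _ (List.mem_map_of_mem ha)
        simpa [hcont] using this
      simp
      rw [if_pos hP, if_pos hP]
    · have hNall : ¬ ∀ a ∈ kw, a ∈ doc := by
        intro h
        apply hball
        rw [List.all_eq_true]
        rintro x hx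
        obtain ⟨w, hw, rfl⟩ := List.mem_map.mp hx
        simpa [hcont] using h w hw
      by_cases hbany : ((kw.map (fun w => PySem.Set.contains (PySem.Set.ofList doc) w)).any id) = true
      · have hE : ∃ x ∈ kw, x ∈ doc := by
          obtain ⟨x, hx, hid⟩ := List.any_eq_true.mp hbany
          obtain ⟨w, hw, rfl⟩ := List.mem_map.mp hx
          exact ⟨w, hw, by simpa [hcont] using hid⟩
        simp [hNall, hE]
      · have hNE : ¬ ∃ x ∈ kw, x ∈ doc := by
          rintro ⟨x, hx, hmem⟩
          apply hbany
          refine List.any_eq_true.mpr ⟨_, List.mem_map_of_mem hx, ?_⟩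
          simpa [hcont] using hmem
        have hU : ∀ a ∈ kw, a ∉ doc := fun a ha hm => hNE ⟨a, ha, hm⟩
        simp [hNall, hNE]
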